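-- pv_equiv track=rewrite | github.com/omegaestable/magma-ai | v26_recovery.py | magma_description
-- ===== SOURCE A (Python) =====
-- def magma_description(table: list[list[int]]) -> str:
--     size = len(table)
--     flat = [table[row][col] for row in range(size) for col in range(size)]
--     if len(set(flat)) == 1:
--         return f"a*b = {flat[0]}"
--     if all(table[row][col] == row for row in range(size) for col in range(size)):
--         return "a*b = a"
--     if all(table[row][col] == col for row in range(size) for col in range(size)):
--         return "a*b = b"
--     if all(table[row][col] == (row + col) % size for row in range(size) for col in range(size)):
--         return f"a*b = (a+b) mod {size}"
--     if all(table[row][col] == (row + 1) % size for row in range(size) for col in range(size)):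
--         return f"a*b = (a+1) mod {size}"
--     if all(table[row][col] == (col + 1) % size for row in range(size) for col in range(size)):
--         return f"a*b = (b+1) mod {size}"
--     return str(table)
-- ===== SOURCE B (Python) =====
-- def magma_description(table: list[list[int]]) -> str:
--     size = len(table)
--     is_a = is_b = is_add = is_a1 = is_b1 = True
--     const = True
--     first = None
--     for row in range(size):
--         for col in range(size):
--             v = table[row][col]
--             if first is None:
--                 first = v
--             if v != first:
--                 const = False
--             if v != row:
--                 is_a = False
--             if v != col:
--                 is_b = False
--             if v != (row + col) % size:
--                 is_add = False
--             if v != (row + 1) % size: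
--                 is_a1 = False
--             if v != (col + 1) % size:
--                 is_b1 = False
--     if first is not None and const:
--         return f"a*b = {first}"
--     if is_a:
--         return "a*b = a"
--     if is_b:
--         return "a*b = b"
--     if is_add:
--         return f"a*b = (a+b) mod {size}"
--     if is_a1:
--         return f"a*b = (a+1) mod {size}"
--     if is_b1:
--         return f"a*b = (b+1) mod {size}"
--     return str(table)
-- ===== Notes on version B (the rewrite author's own statement) =====
-- stated objective: alternative
-- what changed: Replaces A's six separate full-table scans (a flattened list fed to set() plus five all() generator passes) by a single pass over the cells that maintains one boolean flag per candidate law and the first value seen for the constant law.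
import Mathlib
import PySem

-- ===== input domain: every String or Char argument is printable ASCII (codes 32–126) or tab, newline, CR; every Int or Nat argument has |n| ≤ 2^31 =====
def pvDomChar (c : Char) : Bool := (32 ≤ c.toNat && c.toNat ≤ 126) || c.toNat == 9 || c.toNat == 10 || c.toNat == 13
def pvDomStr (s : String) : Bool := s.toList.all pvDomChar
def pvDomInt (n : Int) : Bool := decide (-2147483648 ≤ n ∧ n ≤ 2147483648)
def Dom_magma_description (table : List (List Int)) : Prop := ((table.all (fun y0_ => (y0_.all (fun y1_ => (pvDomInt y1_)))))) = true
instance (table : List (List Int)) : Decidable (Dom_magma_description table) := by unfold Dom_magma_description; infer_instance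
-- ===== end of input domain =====

-- B replaces A's six separate full-table scans by a single pass keeping one boolean flag per
-- candidate law (objective: alternative decomposition, same asymptotic cost).

-- ===== PORT A =====
-- shared accessor: table[row][col] (indices are produced by range(size), so they are in range under Pre_)
def pvAt (table : List (List Int)) (r c : Int) : Int :=
  PySem.List.pyGetD (PySem.List.pyGetD table r []) c 0

-- str(table): Python repr of a list of lists of ints
def pvReprRow (r : List Int) : String :=
  "[" ++ String.intercalate ", " (r.map PySem.Int.toStr) ++ "]"
def pvRepr (t : List (List Int)) : String :=
  "[" ++ String.intercalate ", " (t.map pvReprRow) ++ "]"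

def pvRng (n : Int) : List Int := PySem.List.pyRange 0 n 1

def magma_description (table : List (List Int)) : String :=
  let size : Int := (table.length : Int)
  let flat : List Int := (pvRng size).flatMap (fun r => (pvRng size).map (fun c => pvAt table r c))
  if (PySem.Set.ofList flat).length == 1 then
    "a*b = " ++ PySem.Int.toStr (PySem.List.pyGetD flat 0 0)
  else if (pvRng size).all (fun r => (pvRng size).all (fun c => pvAt table r c == r)) then
    "a*b = a"
  else if (pvRng size).all (fun r => (pvRng size).all (fun c => pvAt table r c == c)) then
    "a*b = b"
  else if (pvRng size).all (fun r => (pvRng size).all (fun c => pvAt table r c == PySem.Int.mod (r + c) size)) then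
    "a*b = (a+b) mod " ++ PySem.Int.toStr size
  else if (pvRng size).all (fun r => (pvRng size).all (fun c => pvAt table r c == PySem.Int.mod (r + 1) size)) then
    "a*b = (a+1) mod " ++ PySem.Int.toStr size
  else if (pvRng size).all (fun r => (pvRng size).all (fun c => pvAt table r c == PySem.Int.mod (c + 1) size)) then
    "a*b = (b+1) mod " ++ PySem.Int.toStr size
  else pvRepr table

-- ===== PORT B =====
structure PvState where
  first : Option Int
  const : Bool
  is_a : Bool
  is_b : Bool
  is_add : Bool
  is_a1 : Bool
  is_b1 : Bool
deriving Repr, DecidableEq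

def pvInit : PvState := ⟨none, true, true, true, true, true, true⟩

def pvStep (table : List (List Int)) (size : Int) (s : PvState) (p : Int × Int) : PvState :=
  let v := pvAt table p.1 p.2
  let f := s.first.getD v          -- `if first is None: first = v`
  { first := some f
    const := s.const && (v == f)
    is_a := s.is_a && (v == p.1)
    is_b := s.is_b && (v == p.2)
    is_add := s.is_add && (v == PySem.Int.mod (p.1 + p.2) size)
    is_a1 := s.is_a1 && (v == PySem.Int.mod (p.1 + 1) size)
    is_b1 := s.is_b1 && (v == PySem.Int.mod (p.2 + 1) size) }

def pvPairs (n : Int) : List (Int × Int) :=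
  (pvRng n).flatMap (fun r => (pvRng n).map (fun c => (r, c)))

def magma_description_alt (table : List (List Int)) : String :=
  let size : Int := (table.length : Int)
  let o := (pvPairs size).foldl (pvStep table size) pvInit
  if o.first.isSome && o.const then
    "a*b = " ++ PySem.Int.toStr (o.first.getD 0)
  else if o.is_a then "a*b = a"
  else if o.is_b then "a*b = b"
  else if o.is_add then "a*b = (a+b) mod " ++ PySem.Int.toStr size
  else if o.is_a1 then "a*b = (a+1) mod " ++ PySem.Int.toStr size
  else if o.is_b1 then "a*b = (b+1) mod " ++ PySem.Int.toStr size
  else pvRepr table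

-- ===== PRECONDITION & SPEC =====
-- Pre_ excludes exactly the inputs on which A raises IndexError: a row shorter than the table.
def Pre_magma_description (table : List (List Int)) : Prop :=
  ∀ row ∈ table, table.length ≤ row.length
instance (table : List (List Int)) : Decidable (Pre_magma_description table) := by
  unfold Pre_magma_description; infer_instance

def pvWitness_magma_description : List (List Int) := [[0, 1], [1, 0]]

def Spec_magma_description (table : List (List Int)) (out : String) : Prop := out = magma_description_alt table
instance (table : List (List Int)) (out : String) : Decidable (Spec_magma_description table out) := by unfold Spec_magma_description; infer_instance

-- ===== CLAIM (what is proved, stated in full; the proofs are below) =====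
def Claim_equal_magma_description : Prop := ∀ (table : List (List Int)), Dom_magma_description table → Pre_magma_description table → Spec_magma_description table (magma_description table)

-- ===== LEMMAS AND PROOFS =====

-- closed forms of the fold's components
theorem pvFold_is_a (t : List (List Int)) (n : Int) (l : List (Int × Int)) (s : PvState) :
    (l.foldl (pvStep t n) s).is_a = (s.is_a && l.all (fun p => pvAt t p.1 p.2 == p.1)) := by
  induction l generalizing s with
  | nil => simp
  | cons p l ih => simp [ih, pvStep, Bool.and_assoc]

theorem pvFold_is_b (t : List (List Int)) (n : Int) (l : List (Int × Int)) (s : PvState) :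
    (l.foldl (pvStep t n) s).is_b = (s.is_b && l.all (fun p => pvAt t p.1 p.2 == p.2)) := by
  induction l generalizing s with
  | nil => simp
  | cons p l ih => simp [ih, pvStep, Bool.and_assoc]

theorem pvFold_is_add (t : List (List Int)) (n : Int) (l : List (Int × Int)) (s : PvState) :
    (l.foldl (pvStep t n) s).is_add
      = (s.is_add && l.all (fun p => pvAt t p.1 p.2 == PySem.Int.mod (p.1 + p.2) n)) := by
  induction l generalizing s with
  | nil => simp
  | cons p l ih => simp [ih, pvStep, Bool.and_assoc]

theorem pvFold_is_a1 (t : List (List Int)) (n : Int) (l : List (Int × Int)) (s : PvState) :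
    (l.foldl (pvStep t n) s).is_a1
      = (s.is_a1 && l.all (fun p => pvAt t p.1 p.2 == PySem.Int.mod (p.1 + 1) n)) := by
  induction l generalizing s with
  | nil => simp
  | cons p l ih => simp [ih, pvStep, Bool.and_assoc]

theorem pvFold_is_b1 (t : List (List Int)) (n : Int) (l : List (Int × Int)) (s : PvState) :
    (l.foldl (pvStep t n) s).is_b1
      = (s.is_b1 && l.all (fun p => pvAt t p.1 p.2 == PySem.Int.mod (p.2 + 1) n)) := by
  induction l generalizing s with
  | nil => simp
  | cons p l ih => simp [ih, pvStep, Bool.and_assoc]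

theorem pvFold_first (t : List (List Int)) (n : Int) (l : List (Int × Int)) (s : PvState) :
    (l.foldl (pvStep t n) s).first
      = s.first.or (l.map (fun p => pvAt t p.1 p.2)).head? := by
  induction l generalizing s with
  | nil => simp
  | cons p l ih =>
      rw [List.foldl_cons, ih]
      cases h : s.first <;> simp [pvStep, h]

theorem pvFold_const_some (t : List (List Int)) (n : Int) (l : List (Int × Int)) (f : Int) :
    ∀ s : PvState, s.first = some f →
      (l.foldl (pvStep t n) s).const
        = (s.const && (l.map (fun p => pvAt t p.1 p.2)).all (· == f)) := by
  induction l with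
  | nil => intro s _; simp
  | cons p l ih =>
      intro s h
      rw [List.foldl_cons, ih (pvStep t n s p) (by simp [pvStep, h])]
      simp [pvStep, h, Bool.and_assoc]

-- Set.add never shrinks a set
theorem pvAdd_len_mono (l : List Int) : ∀ s : List Int, s.length ≤ (l.foldl PySem.Set.add s).length := by
  induction l with
  | nil => intro s; simp
  | cons x l ih =>
      intro s
      refine le_trans ?_ (ih (PySem.Set.add s x))
      simp [PySem.Set.add]; split <;> simp

-- len(set(a :: l)) == 1 iff every element of l equals a
theorem pvSet_singleton (l : List Int) : ∀ a : Int,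
    (((l.foldl PySem.Set.add [a]).length == 1) = l.all (· == a)) := by
  induction l with
  | nil => intro a; simp
  | cons x l ih =>
      intro a
      by_cases hx : x = a
      · subst hx
        simp [ih x]
      · have h2 : 2 ≤ (l.foldl PySem.Set.add [a, x]).length := pvAdd_len_mono l [a, x]
        have hne : ((l.foldl PySem.Set.add [a, x]).length == 1) = false := by
          simp; omega
        simp [hne, beq_iff_eq, hx]

theorem pvSetLen_one (vals : List Int) :
    ((PySem.Set.ofList vals).length == 1)
      = (match vals with
         | [] => false
         | a :: rest => rest.all (· == a)) := by
  cases vals with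
  | nil => simp [PySem.Set.ofList_eq_foldl]
  | cons a rest =>
      have h0 : PySem.Set.add ([] : List Int) a = [a] := by
        simp [PySem.Set.add, PySem.Set.contains]
      simp only [PySem.Set.ofList_eq_foldl, List.foldl_cons, h0]
      exact pvSet_singleton rest a

theorem pvHead_getD (vals : List Int) : vals.head?.getD 0 = PySem.List.pyGetD vals 0 0 := by
  cases vals <;> simp [PySem.List.pyGetD_zero]

-- flat list of values = values of the pair list
theorem pvFlat_eq (t : List (List Int)) (n : Int) :
    (pvRng n).flatMap (fun r => (pvRng n).map (fun c => pvAt t r c))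
      = (pvPairs n).map (fun p => pvAt t p.1 p.2) := by
  simp [pvPairs, List.map_flatMap, List.map_map, Function.comp_def]

-- A's nested all over two ranges = B's all over the pair list
theorem pvAll_pairs (n : Int) (P : Int → Int → Bool) :
    (pvPairs n).all (fun p => P p.1 p.2)
      = (pvRng n).all (fun r => (pvRng n).all (fun c => P r c)) := by
  simp [pvPairs, List.all_flatMap, List.all_map, Function.comp_def]

-- the constant-law guard of B equals A's len(set(vals)) == 1, over any pair list
theorem pvGuard_fold (t : List (List Int)) (n : Int) (l : List (Int × Int)) :
    ((l.foldl (pvStep t n) pvInit).first.isSome && (l.foldl (pvStep t n) pvInit).const)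
      = ((PySem.Set.ofList (l.map (fun p => pvAt t p.1 p.2))).length == 1) := by
  rw [pvSetLen_one]
  cases l with
  | nil => simp [pvInit]
  | cons p l =>
      have h1 : (pvStep t n pvInit p).first = some (pvAt t p.1 p.2) := by
        simp [pvStep, pvInit]
      have h2 : (pvStep t n pvInit p).const = true := by
        simp [pvStep, pvInit]
      rw [List.foldl_cons, pvFold_const_some t n l (pvAt t p.1 p.2) _ h1, pvFold_first, h1, h2]
      simp

theorem pvFirst_fold (t : List (List Int)) (n : Int) (l : List (Int × Int)) :
    ((l.foldl (pvStep t n) pvInit).first.getD 0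
      = PySem.List.pyGetD (l.map (fun p => pvAt t p.1 p.2)) 0 0) := by
  rw [pvFold_first, ← pvHead_getD]
  simp [pvInit]

-- bridge lemmas stated exactly in the shape of the two ports
theorem pvFlag_a (t : List (List Int)) (n : Int) :
    ((pvPairs n).foldl (pvStep t n) pvInit).is_a
      = (pvRng n).all (fun r => (pvRng n).all (fun c => pvAt t r c == r)) := by
  rw [pvFold_is_a]
  simp only [pvInit, Bool.true_and]
  exact pvAll_pairs n (fun r c => pvAt t r c == r)

theorem pvFlag_b (t : List (List Int)) (n : Int) :
    ((pvPairs n).foldl (pvStep t n) pvInit).is_b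
      = (pvRng n).all (fun r => (pvRng n).all (fun c => pvAt t r c == c)) := by
  rw [pvFold_is_b]
  simp only [pvInit, Bool.true_and]
  exact pvAll_pairs n (fun r c => pvAt t r c == c)

theorem pvFlag_add (t : List (List Int)) (n : Int) :
    ((pvPairs n).foldl (pvStep t n) pvInit).is_add
      = (pvRng n).all (fun r => (pvRng n).all (fun c => pvAt t r c == PySem.Int.mod (r + c) n)) := by
  rw [pvFold_is_add]
  simp only [pvInit, Bool.true_and]
  exact pvAll_pairs n (fun r c => pvAt t r c == PySem.Int.mod (r + c) n)

theorem pvFlag_a1 (t : List (List Int)) (n : Int) :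
    ((pvPairs n).foldl (pvStep t n) pvInit).is_a1
      = (pvRng n).all (fun r => (pvRng n).all (fun c => pvAt t r c == PySem.Int.mod (r + 1) n)) := by
  rw [pvFold_is_a1]
  simp only [pvInit, Bool.true_and]
  exact pvAll_pairs n (fun r c => pvAt t r c == PySem.Int.mod (r + 1) n)

theorem pvFlag_b1 (t : List (List Int)) (n : Int) :
    ((pvPairs n).foldl (pvStep t n) pvInit).is_b1
      = (pvRng n).all (fun r => (pvRng n).all (fun c => pvAt t r c == PySem.Int.mod (c + 1) n)) := by
  rw [pvFold_is_b1]
  simp only [pvInit, Bool.true_and]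
  exact pvAll_pairs n (fun r c => pvAt t r c == PySem.Int.mod (c + 1) n)

-- ===== VERDICT (by name: the statement is the Claim_ definition above) =====
theorem magma_description_spec : Claim_equal_magma_description := by
  intro table _ _
  show magma_description table = magma_description_alt table
  simp only [magma_description, magma_description_alt]
  rw [pvFlat_eq, pvGuard_fold, pvFirst_fold,
      pvFlag_a, pvFlag_b, pvFlag_add, pvFlag_a1, pvFlag_b1]
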